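-- pv_equiv track=rewrite | github.com/zqwei/stock_tracker_and_action | src/portfolio_assistant/ingest/csv_import.py | parse_import_issue
-- ===== SOURCE A (Python) =====
-- from typing import BinaryIO, Literal
--
-- ImportIssueSeverity = Literal["INFO", "WARNING", "ERROR"]
--
-- _IMPORT_ISSUE_SEVERITIES: tuple[ImportIssueSeverity, ...] = ("INFO", "WARNING", "ERROR")
--
-- def parse_import_issue(issue: str) -> tuple[ImportIssueSeverity, str]:
--     text = str(issue or "").strip()
--     for severity in _IMPORT_ISSUE_SEVERITIES:
--         prefix = f"[{severity}]"
--         if text.upper().startswith(prefix):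
--             detail = text[len(prefix) :].lstrip(" :")
--             return severity, detail or text
--     # Backward-compatible default for old untagged issue text.
--     return "WARNING", text
-- ===== SOURCE B (Python) =====
-- _SEVERITIES = frozenset({"INFO", "WARNING", "ERROR"})
--
--
-- def parse_import_issue(issue):
--     text = str(issue or "").strip()
--     if text.startswith("["):
--         idx = text.find("]")
--         if idx != -1:
--             token = text[1:idx].upper()
--             if token in _SEVERITIES:
--                 detail = text[idx + 1:].lstrip(" :")
--                 return token, detail or text
--     return "WARNING", text
-- ===== Notes on version B (the rewrite author's own statement) =====
-- stated objective: simpler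
-- what changed: Instead of looping over the three severities and re-testing the uppercased text against each bracketed prefix, B parses the bracket tag once (text between the opening bracket and the first closing bracket), uppercases that token and checks membership in a frozenset, then slices the detail after the closing bracket.
import Mathlib
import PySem

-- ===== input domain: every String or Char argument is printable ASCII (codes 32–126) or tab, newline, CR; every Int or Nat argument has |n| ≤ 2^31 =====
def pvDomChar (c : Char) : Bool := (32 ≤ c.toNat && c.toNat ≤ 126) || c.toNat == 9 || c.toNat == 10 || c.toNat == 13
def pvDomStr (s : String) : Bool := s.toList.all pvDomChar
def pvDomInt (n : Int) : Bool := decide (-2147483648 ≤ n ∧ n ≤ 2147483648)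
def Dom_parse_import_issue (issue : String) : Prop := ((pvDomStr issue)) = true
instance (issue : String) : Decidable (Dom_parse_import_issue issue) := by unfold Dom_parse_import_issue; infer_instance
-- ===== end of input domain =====

-- B replaces A's loop over the three bracketed prefixes by parsing the "[TOKEN]" tag once and
-- testing the uppercased token against a set (objective: simpler).

-- Python's str.lstrip(" :"): drop leading characters belonging to {' ', ':'} (exact: lstrip with a
-- char-set argument is dropWhile membership). Both A and B call .lstrip(" :"), so both ports use it.
def pvLstripColon (cs : List Char) : List Char := cs.dropWhile (fun c => c == ' ' || c == ':')

-- ===== PORT A =====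
-- _IMPORT_ISSUE_SEVERITIES
def pvSeveritiesA : List String := ["INFO", "WARNING", "ERROR"]

-- the 'for severity in _IMPORT_ISSUE_SEVERITIES' loop of A (early return = recursion result)
def pvLoopA (text : List Char) : List String → String × String
  | [] => ("WARNING", String.ofList text)   -- backward-compatible default for old untagged issue text
  | sev :: rest =>
    let pre : List Char := '[' :: (sev.toList ++ [']'])   -- f"[{severity}]"
    if PySem.Chars.startswith (PySem.Chars.upper text) pre then
      -- text[len(prefix):] with a nonnegative index is List.drop
      let detail := pvLstripColon (text.drop pre.length)
      (sev, String.ofList (if detail.isEmpty then text else detail))   -- detail or text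
    else pvLoopA text rest

def parse_import_issue (issue : String) : String × String :=
  -- str(issue or "").strip(): for a str argument this is issue.strip() (the 'or ""' only replaces "" by "")
  pvLoopA (PySem.Chars.strip issue.toList) pvSeveritiesA

-- ===== PORT B =====
-- _SEVERITIES (a frozenset)
def pvSevSet : PySem.Set (List Char) := PySem.Set.ofList ["INFO".toList, "WARNING".toList, "ERROR".toList]

def parse_import_issue_alt (issue : String) : String × String :=
  let text := PySem.Chars.strip issue.toList
  if PySem.Chars.startswith text ['['] then
    let idx := PySem.Chars.find text [']']
    if idx ≠ -1 then
      let token := PySem.Chars.upper (PySem.List.slice text (some 1) (some idx))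
      if token ∈ pvSevSet then
        let detail := pvLstripColon (PySem.List.slice text (some (idx + 1)))
        (String.ofList token, String.ofList (if detail.isEmpty then text else detail))
      else ("WARNING", String.ofList text)
    else ("WARNING", String.ofList text)
  else ("WARNING", String.ofList text)

-- ===== PRECONDITION & SPEC =====
def Spec_parse_import_issue (issue : String) (out : String × String) : Prop := out = parse_import_issue_alt issue
instance (issue : String) (out : String × String) : Decidable (Spec_parse_import_issue issue out) := by unfold Spec_parse_import_issue; infer_instance

-- ===== CLAIM (what is proved, stated in full; the proofs are below) =====
def Claim_equal_parse_import_issue : Prop := ∀ (issue : String), Dom_parse_import_issue issue → Spec_parse_import_issue issue (parse_import_issue issue)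

-- ===== LEMMAS AND PROOFS =====

-- uppercasing cannot produce a character outside A–Z except fixed points: if upperChar c = d and d
-- is not an uppercase letter, then c = d (in particular for d = '[' and d = ']')
theorem pv_upperChar_preimage (c d : Char) (hd : 91 ≤ d.toNat ∨ d.toNat < 65)
    (h : PySem.Chars.upperChar c = d) : c = d := by
  unfold PySem.Chars.upperChar PySem.Chars.islower at h
  split at h
  · next hl =>
    exfalso
    simp only [Bool.and_eq_true, decide_eq_true_eq, Char.le_def] at hl
    have h97 : 97 ≤ c.toNat := hl.1
    have h122 : c.toNat ≤ 122 := hl.2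
    have hvalid : Nat.isValidChar (c.toNat - 32) := Or.inl (by omega)
    have hv : (Char.ofNat (c.toNat - 32)).toNat = c.toNat - 32 := by
      rw [Char.toNat_ofNat, if_pos hvalid]
    have h2 := congrArg Char.toNat h
    rw [hv] at h2
    omega
  · exact h

-- A's test "text.upper().startswith('[SEV]')" characterised: it holds iff text splits as
-- '[' :: m ++ ']' :: r with upper m = SEV and no ']' inside m
theorem pv_startswith_upper_iff (t sev : List Char) (hsev : ']' ∉ sev) :
    PySem.Chars.startswith (PySem.Chars.upper t) ('[' :: (sev ++ [']'])) = true ↔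
      ∃ m r, t = '[' :: (m ++ ']' :: r) ∧ PySem.Chars.upper m = sev ∧ ']' ∉ m := by
  rw [PySem.Chars.startswith_iff]
  constructor
  · intro h
    obtain ⟨s2, hs⟩ := h
    have hmap : PySem.Chars.upper t = ('[' :: sev ++ [']']) ++ s2 := by
      simpa using hs.symm
    rw [PySem.Chars.upper, List.map_eq_append_iff] at hmap
    obtain ⟨t1, t2, rfl, h1, h2⟩ := hmap
    have h1' : List.map PySem.Chars.upperChar t1 = '[' :: (sev ++ [']']) := by simpa using h1
    rw [List.map_eq_cons_iff] at h1'
    obtain ⟨c0, t1', rfl, hc0, h3⟩ := h1'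
    rw [List.map_eq_append_iff] at h3
    obtain ⟨m, v, rfl, hmm, hv⟩ := h3
    have hc0' : c0 = '[' := pv_upperChar_preimage _ _ (by left; decide) hc0
    obtain ⟨cv, hvshape⟩ : ∃ cv, v = [cv] := by
      cases v with
      | nil => simp at hv
      | cons a b => cases b with
        | nil => exact ⟨a, rfl⟩
        | cons x y => simp at hv
    subst hvshape
    have hcv : cv = ']' := pv_upperChar_preimage _ _ (by left; decide) (by simpa using hv)
    refine ⟨m, t2, ?_, hmm, ?_⟩
    · subst hc0' hcv; simp
    · intro hmem
      apply hsev
      rw [← hmm]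
      have hfix : PySem.Chars.upperChar ']' = ']' := by decide
      exact hfix ▸ List.mem_map_of_mem hmem
  · rintro ⟨m, r, rfl, hup, hm⟩
    refine ⟨List.map PySem.Chars.upperChar r, ?_⟩
    have hexp : PySem.Chars.upper ('[' :: (m ++ ']' :: r)) =
        '[' :: (PySem.Chars.upper m ++ ']' :: List.map PySem.Chars.upperChar r) := by
      simp [PySem.Chars.upper]
      constructor
      · decide
      · decide
    rw [hexp, hup]
    simp

-- the first ']' of '[' :: m ++ ']' :: r is at index m.length + 1
theorem pv_find_close (m r : List Char) (hm : ']' ∉ m) :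
    PySem.Chars.find ('[' :: (m ++ ']' :: r)) [']'] = ((m.length : Int) + 1) := by
  set t : List Char := '[' :: (m ++ ']' :: r) with ht
  have hinf : [']'] <:+: t := ⟨'[' :: m, r, by simp [ht]⟩
  have hnn : 0 ≤ PySem.Chars.find t [']'] := (PySem.Chars.find_nonneg_iff t [']']).mpr hinf
  obtain ⟨hpre, hmin⟩ := PySem.Chars.find_spec hnn
  set k := (PySem.Chars.find t [']']).toNat with hk
  have hdropml : List.drop (m.length + 1) t = ']' :: r := by
    have hsplit : t = ('[' :: m) ++ (']' :: r) := by simp [ht]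
    rw [hsplit, List.drop_left' (by simp)]
  have hub : k ≤ m.length + 1 := by
    by_contra hgt
    exact hmin (m.length + 1) (by omega) (by rw [hdropml]; exact ⟨r, rfl⟩)
  have hget : t[k]? = some ']' := by
    obtain ⟨tail, htail⟩ := hpre
    have h0 : (List.drop k t)[0]? = some ']' := by rw [← htail]; rfl
    simpa using h0
  have hlb : ¬ k < m.length + 1 := by
    intro hlt
    rcases Nat.eq_zero_or_pos k with h0 | hpos
    · rw [h0, ht] at hget
      simp at hget
    · have hk1 : k - 1 < m.length := by omega
      have hidx : t[k]? = m[k - 1]? := by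
        rw [ht]
        rw [List.getElem?_cons]
        simp only [if_neg (by omega : ¬ k = 0)]
        rw [List.getElem?_append_left (by omega)]
      rw [hidx, List.getElem?_eq_getElem hk1] at hget
      exact hm (by
        have hv : m[k-1] = ']' := by simpa using hget
        exact hv ▸ m.getElem_mem hk1)
  have hkval : k = m.length + 1 := by omega
  have h1 := Int.toNat_of_nonneg hnn
  rw [← h1, ← hk, hkval]
  push_cast
  ring

-- the first-']' split is unique
theorem pv_split_unique : ∀ (m m' r r' : List Char), ']' ∉ m → ']' ∉ m' →
    m ++ ']' :: r = m' ++ ']' :: r' → m = m' ∧ r = r'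
  | [], [], r, r', _, _, h => by simpa using h
  | [], c :: cs, r, r', _, hm', h => by
      exfalso; apply hm'
      have h' : (']' : Char) = c ∧ r = cs ++ ']' :: r' := by simpa using h
      rw [← h'.1]; exact List.mem_cons_self
  | c :: cs, [], r, r', hm, _, h => by
      exfalso; apply hm
      have h' : c = ']' ∧ cs ++ ']' :: r = r' := by simpa using h
      rw [h'.1]; exact List.mem_cons_self
  | c :: cs, c' :: cs', r, r', hm, hm', h => by
      have h' : c = c' ∧ cs ++ ']' :: r = cs' ++ ']' :: r' := by simpa using h
      have ih := pv_split_unique cs cs' r r' (fun hx => hm (List.mem_cons_of_mem _ hx))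
        (fun hx => hm' (List.mem_cons_of_mem _ hx)) h'.2
      exact ⟨by rw [h'.1, ih.1], ih.2⟩

-- A's condition for a concrete severity, on a t whose first-']' split is '[' :: m ++ ']' :: r
theorem pv_condA_iff (m r sev : List Char) (hm : ']' ∉ m) (hsev : ']' ∉ sev) :
    PySem.Chars.startswith (PySem.Chars.upper ('[' :: (m ++ ']' :: r))) ('[' :: (sev ++ [']'])) = true ↔
      PySem.Chars.upper m = sev := by
  rw [pv_startswith_upper_iff _ _ hsev]
  constructor
  · rintro ⟨m', r', heq, hup, hm'⟩
    simp only [List.cons.injEq] at heq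
    obtain ⟨rfl, -⟩ := pv_split_unique m m' r r' hm hm' heq.2
    exact hup
  · intro hup
    exact ⟨m, r, rfl, hup, hm⟩

theorem parse_import_issue_spec' : ∀ (issue : String),
    parse_import_issue issue = parse_import_issue_alt issue := by
  intro issue
  simp only [parse_import_issue, parse_import_issue_alt]
  generalize PySem.Chars.strip issue.toList = t
  by_cases h0 : ∃ l, t = '[' :: l
  · obtain ⟨l, rfl⟩ := h0
    have hsw : PySem.Chars.startswith ('[' :: l) ['['] = true := by
      rw [PySem.Chars.startswith_iff]; exact ⟨l, rfl⟩
    by_cases hmem : ']' ∈ l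
    · obtain ⟨m, r, rfl, hm⟩ := List.eq_append_cons_of_mem hmem
      have hfind := pv_find_close m r hm
      have hlen1 : (0:Int) ≤ 1 := by omega
      have hidxnn : (0:Int) ≤ (m.length : Int) + 1 := by omega
      have hslice1 : PySem.List.slice ('[' :: (m ++ ']' :: r)) (some 1) (some ((m.length:Int)+1)) = m := by
        rw [PySem.List.slice_toNat _ hlen1 hidxnn]
        have h1 : ((m.length:Int)+1).toNat = m.length + 1 := by omega
        have h2 : ((1:Int)).toNat = 1 := by omega
        rw [h1, h2]
        simp only [List.drop_succ_cons, List.drop_zero]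
        have h3 : m.length + 1 - 1 = m.length := by omega
        rw [h3]
        have h4 : (m ++ ']' :: r : List Char) = m ++ (']' :: r) := rfl
        rw [h4, List.take_left' rfl]
      have hslice2 : PySem.List.slice ('[' :: (m ++ ']' :: r)) (some ((m.length:Int)+1+1)) = r := by
        rw [PySem.List.slice_from _ (by omega)]
        have h1 : ((m.length:Int)+1+1).toNat = m.length + 2 := by omega
        rw [h1]
        have h2 : ('[' :: (m ++ ']' :: r) : List Char) = ('[' :: m ++ [']']) ++ r := by simp
        rw [h2, List.drop_left' (by simp)]
      have hdropA : ∀ n, n = m.length + 2 → List.drop n ('[' :: (m ++ ']' :: r)) = r := by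
        intro n hn
        have h2 : ('[' :: (m ++ ']' :: r) : List Char) = ('[' :: m ++ [']']) ++ r := by simp
        rw [h2, hn, List.drop_left' (by simp)]
      have hne : ((m.length : Int) + 1) ≠ -1 := by omega
      have hcondT : ∀ (sev : List Char), ']' ∉ sev → PySem.Chars.upper m = sev →
          PySem.Chars.startswith (PySem.Chars.upper ('[' :: (m ++ ']' :: r)))
            ('[' :: (sev ++ [']'])) = true :=
        fun sev hsev h => (pv_condA_iff m r sev hm hsev).mpr h
      have hcondF : ∀ (sev : List Char), ']' ∉ sev → ¬ PySem.Chars.upper m = sev →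
          PySem.Chars.startswith (PySem.Chars.upper ('[' :: (m ++ ']' :: r)))
            ('[' :: (sev ++ [']'])) = false := by
        intro sev hsev hne'
        rw [← Bool.not_eq_true, pv_condA_iff m r sev hm hsev]
        exact hne'
      have hlenm : (PySem.Chars.upper m).length = m.length := by simp [PySem.Chars.upper]
      by_cases hI : PySem.Chars.upper m = "INFO".toList
      · have hlm : m.length = 4 := by rw [← hlenm, hI]; rfl
        have hms : (['I','N','F','O'] ∈ pvSevSet) := by decide
        simp only [pvLoopA, pvSeveritiesA, hcondT _ (by decide) hI]
        simp [hsw, hfind, hne, hslice1, hslice2, hI, hms, hdropA 6 (by omega)]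
      · by_cases hW : PySem.Chars.upper m = "WARNING".toList
        · have hlm : m.length = 7 := by rw [← hlenm, hW]; rfl
          have hms : (['W','A','R','N','I','N','G'] ∈ pvSevSet) := by decide
          simp only [pvLoopA, pvSeveritiesA, hcondF _ (by decide) hI,
            hcondT _ (by decide) hW]
          simp [hsw, hfind, hne, hslice1, hslice2, hW, hms, hdropA 9 (by omega)]
        · by_cases hE : PySem.Chars.upper m = "ERROR".toList
          · have hlm : m.length = 5 := by rw [← hlenm, hE]; rfl
            have hms : (['E','R','R','O','R'] ∈ pvSevSet) := by decide
            simp only [pvLoopA, pvSeveritiesA, hcondF _ (by decide) hI,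
              hcondF _ (by decide) hW, hcondT _ (by decide) hE]
            simp [hsw, hfind, hne, hslice1, hslice2, hE, hms, hdropA 7 (by omega)]
          · have hms : ¬ (PySem.Chars.upper m ∈ pvSevSet) := by
              simp [pvSevSet, PySem.Set.mem_ofList]
              exact ⟨hI, hW, hE⟩
            simp only [pvLoopA, pvSeveritiesA, hcondF _ (by decide) hI,
              hcondF _ (by decide) hW, hcondF _ (by decide) hE]
            simp [hsw, hfind, hne, hslice1, hms]
    · have hfind : PySem.Chars.find ('[' :: l) [']'] = -1 := by
        rw [PySem.Chars.find_eq_neg_one_iff]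
        intro hinf
        have hin : (']' : Char) ∈ '[' :: l := hinf.subset (by simp)
        rcases List.mem_cons.mp hin with hbad | hin
        · exact absurd hbad (by decide)
        · exact hmem hin
      have hcf : ∀ (sev : List Char), ']' ∉ sev →
          PySem.Chars.startswith (PySem.Chars.upper ('[' :: l)) ('[' :: (sev ++ [']'])) = false := by
        intro sev hsev
        rw [← Bool.not_eq_true, pv_startswith_upper_iff _ sev hsev]
        rintro ⟨m, r, heq, -, -⟩
        apply hmem
        have hl : l = m ++ ']' :: r := by simpa using heq
        rw [hl]; simp
      simp only [pvLoopA, pvSeveritiesA]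
      rw [hcf "INFO".toList (by decide), hcf "WARNING".toList (by decide),
        hcf "ERROR".toList (by decide)]
      simp [hsw, hfind]
  · have hswf : PySem.Chars.startswith t ['['] = false := by
      rw [← Bool.not_eq_true, PySem.Chars.startswith_iff]
      rintro ⟨s2, hs⟩
      exact h0 ⟨s2, hs.symm⟩
    have hcf : ∀ (sev : List Char), ']' ∉ sev →
        PySem.Chars.startswith (PySem.Chars.upper t) ('[' :: (sev ++ [']'])) = false := by
      intro sev hsev
      rw [← Bool.not_eq_true, pv_startswith_upper_iff _ sev hsev]
      rintro ⟨m, r, rfl, -, -⟩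
      exact h0 ⟨_, rfl⟩
    simp only [pvLoopA, pvSeveritiesA]
    rw [hcf "INFO".toList (by decide), hcf "WARNING".toList (by decide),
      hcf "ERROR".toList (by decide)]
    simp [hswf]

-- ===== VERDICT (by name: the statement is the Claim_ definition above) =====
theorem parse_import_issue_spec : Claim_equal_parse_import_issue := by
  intro issue _
  exact parse_import_issue_spec' issue
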